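-- pv_equiv track=rewrite | github.com/vinbyte/id-location-ner | src/location_ner/hf_ner.py | _find_chunk_end
-- ===== SOURCE A (Python) =====
-- def _find_chunk_end(text: str, start: int, target_end: int) -> int:
--     """Find a good chunk boundary <= target_end.
--
--     We search backward in a small window for a separator to reduce splitting.
--     """
--     if target_end <= start:
--         return start
--
--     # Search back within this many characters.
--     window = 250
--     search_start = max(start, target_end - window)
--
--     # Prefer sentence-ish boundaries first, then whitespace.
--     preferred = {"\n", ".", "!", "?", ";", ","}
--
--     for i in range(target_end - 1, search_start - 1, -1):
--         if text[i] in preferred: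
--             return i + 1
--
--     for i in range(target_end - 1, search_start - 1, -1):
--         if text[i].isspace():
--             return i + 1
--
--     return target_end
-- ===== SOURCE B (Python) =====
-- def _find_chunk_end(text: str, start: int, target_end: int) -> int:
--     """Single forward pass over the window, tracking the rightmost preferred
--     separator and the rightmost other whitespace, instead of two backward scans."""
--     if target_end <= start:
--         return start
--     search_start = max(start, target_end - 250)
--     last_pref = -1
--     last_ws = -1
--     for i in range(search_start, target_end):
--         c = text[i]
--         if c in "\n.!?;,":
--             last_pref = i
--         elif c.isspace():
--             last_ws = i
--     if last_pref != -1: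
--         return last_pref + 1
--     if last_ws != -1:
--         return last_ws + 1
--     return target_end
-- ===== Notes on version B (the rewrite author's own statement) =====
-- stated objective: alternative
-- what changed: Replaces A's two backward scans over the window (preferred chars first, then whitespace) with one forward fold that tracks the rightmost preferred separator and the rightmost other whitespace and picks between them afterwards.
-- outside the precondition, e.g. on _find_chunk_end(' .', -2, 0): A returns 0, B returns -1; on _find_chunk_end('ab', 0, 5): A raises IndexError, B raises IndexError
import Mathlib
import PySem

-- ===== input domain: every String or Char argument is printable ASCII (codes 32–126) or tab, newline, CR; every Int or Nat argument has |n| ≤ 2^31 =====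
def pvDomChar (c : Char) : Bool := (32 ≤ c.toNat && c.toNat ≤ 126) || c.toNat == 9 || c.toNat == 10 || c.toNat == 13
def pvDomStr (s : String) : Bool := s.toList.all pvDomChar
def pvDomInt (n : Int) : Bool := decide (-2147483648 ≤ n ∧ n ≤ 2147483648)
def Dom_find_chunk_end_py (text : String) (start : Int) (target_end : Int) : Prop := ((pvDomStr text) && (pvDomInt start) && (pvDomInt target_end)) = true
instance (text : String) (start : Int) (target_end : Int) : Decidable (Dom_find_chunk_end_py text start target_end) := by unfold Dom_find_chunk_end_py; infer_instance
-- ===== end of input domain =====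

-- B replaces A's two backward window scans by one forward pass keeping the rightmost
-- preferred separator and the rightmost other whitespace (objective: alternative decomposition).

-- ===== PORT A =====

-- the set {"\n", ".", "!", "?", ";", ","}
def chunkPref (c : Char) : Bool :=
  c == '\n' || c == '.' || c == '!' || c == '?' || c == ';' || c == ','

-- 'for i in …: if pred(text[i]): return i + 1' — first match wins; pyGet? = none is
-- IndexError in Python (unreachable inside Pre_), the recursion just continues there.
def chunkScan (text : List Char) (pred : Char → Bool) : List Int → Option Int
  | [] => none
  | i :: rest =>
    match PySem.List.pyGet? text i with
    | some c => if pred c then some (i + 1) else chunkScan text pred rest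
    | none => chunkScan text pred rest

def find_chunk_end_py (text : String) (start : Int) (target_end : Int) : Int :=
  if target_end ≤ start then start
  else
    let window : Int := 250
    let search_start := max start (target_end - window)
    let idxs := PySem.List.pyRange (target_end - 1) (search_start - 1) (-1)
    match chunkScan text.toList chunkPref idxs with
    | some r => r
    | none =>
      match chunkScan text.toList PySem.Chars.isspace idxs with
      | some r => r
      | none => target_end

-- ===== PORT B =====

-- one loop body: 'if c in "\n.!?;,": last_pref = i  elif c.isspace(): last_ws = i'
def chunkStep (text : List Char) (acc : Int × Int) (i : Int) : Int × Int :=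
  match PySem.List.pyGet? text i with
  | some c =>
    if PySem.Chars.isIn [c] ['\n', '.', '!', '?', ';', ','] then (i, acc.2)
    else if PySem.Chars.isspace c then (acc.1, i)
    else acc
  | none => acc

def find_chunk_end_py_alt (text : String) (start : Int) (target_end : Int) : Int :=
  if target_end ≤ start then start
  else
    let search_start := max start (target_end - 250)
    let p := (PySem.List.pyRange search_start target_end 1).foldl (chunkStep text.toList) (-1, -1)
    if p.1 ≠ -1 then p.1 + 1
    else if p.2 ≠ -1 then p.2 + 1
    else target_end

-- ===== PRECONDITION & SPEC =====
-- Pre_ excludes inputs whose scanned window reaches an index outside [0, len(text)):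
-- there A either raises IndexError or returns a value via Python's accidental
-- negative-index wraparound.
def Pre_find_chunk_end_py (text : String) (start : Int) (target_end : Int) : Prop :=
  target_end ≤ start ∨ (0 ≤ start ∧ target_end ≤ (text.length : Int))
instance (text : String) (start : Int) (target_end : Int) : Decidable (Pre_find_chunk_end_py text start target_end) := by unfold Pre_find_chunk_end_py; infer_instance

def pvWitness_find_chunk_end_py : String × Int × Int := ("hello world. foo", 0, 16)

def Spec_find_chunk_end_py (text : String) (start : Int) (target_end : Int) (out : Int) : Prop := out = find_chunk_end_py_alt text start target_end
instance (text : String) (start : Int) (target_end : Int) (out : Int) : Decidable (Spec_find_chunk_end_py text start target_end out) := by unfold Spec_find_chunk_end_py; infer_instance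

-- ===== CLAIM (what is proved, stated in full; the proofs are below) =====
def Claim_equal_find_chunk_end_py : Prop := ∀ (text : String) (start : Int) (target_end : Int), Dom_find_chunk_end_py text start target_end → Pre_find_chunk_end_py text start target_end → Spec_find_chunk_end_py text start target_end (find_chunk_end_py text start target_end)

-- ===== LEMMAS AND PROOFS =====

-- '[c] in s' is just membership of the character
theorem singleton_infix_iff_mem {α : Type} (a : α) (l : List α) : [a] <:+: l ↔ a ∈ l := by
  constructor
  · intro h; exact h.subset (List.mem_singleton_self a)
  · intro h
    obtain ⟨s, t, rfl⟩ := List.append_of_mem h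
    exact ⟨s, t, by simp⟩

theorem isIn_singleton_eq_chunkPref (c : Char) :
    PySem.Chars.isIn [c] ['\n', '.', '!', '?', ';', ','] = chunkPref c := by
  by_cases h : chunkPref c = true
  · rw [h, PySem.Chars.isIn_iff_infix, singleton_infix_iff_mem]
    simp only [chunkPref, Bool.or_eq_true, beq_iff_eq] at h
    rcases h with ((((h|h)|h)|h)|h)|h <;> simp [h]
  · rw [Bool.not_eq_true] at h
    rw [h, PySem.Chars.isIn_eq_false_iff, singleton_infix_iff_mem]
    simp only [chunkPref, Bool.or_eq_false_iff, beq_eq_false_iff_ne] at h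
    simp [List.mem_cons]
    tauto

-- the Bool-valued tests the scans apply at an index
def prefAt (t : List Char) (i : Int) : Bool :=
  match PySem.List.pyGet? t i with
  | some c => chunkPref c
  | none => false

def wsAt (t : List Char) (i : Int) : Bool :=
  match PySem.List.pyGet? t i with
  | some c => PySem.Chars.isspace c
  | none => false

-- A's loop is first-match over the index list
theorem chunkScan_eq_find? (t : List Char) (pred : Char → Bool) (l : List Int) :
    chunkScan t pred l =
      (l.find? (fun i => match PySem.List.pyGet? t i with
                         | some c => pred c
                         | none => false)).map (· + 1) := by
  induction l with
  | nil => rfl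
  | cons i rest ih =>
    simp only [chunkScan, List.find?]
    cases h : PySem.List.pyGet? t i with
    | none => simp [ih]
    | some c =>
      by_cases hp : pred c = true
      · simp [hp]
      · rw [Bool.not_eq_true] at hp
        simp [hp, ih]

-- B's fold: the first components is the LAST preferred index of l (else the accumulator)
theorem foldl_chunkStep_fst (t : List Char) (l : List Int) (acc : Int × Int) :
    (l.foldl (chunkStep t) acc).1 =
      match l.reverse.find? (prefAt t) with
      | some i => i
      | none => acc.1 := by
  induction l using List.reverseRecOn generalizing acc with
  | nil => rfl
  | append_singleton l a ih =>
    rw [List.foldl_append, List.reverse_append]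
    simp only [List.foldl_cons, List.foldl_nil, List.reverse_singleton, List.singleton_append,
      List.find?]
    cases h : PySem.List.pyGet? t a with
    | none => simp [chunkStep, h, prefAt, ih]
    | some c =>
      by_cases hp : chunkPref c = true
      · simp [chunkStep, h, prefAt, hp, isIn_singleton_eq_chunkPref]
      · rw [Bool.not_eq_true] at hp
        by_cases hw : PySem.Chars.isspace c = true
        · simp [chunkStep, h, prefAt, hp, hw, isIn_singleton_eq_chunkPref, ih]
        · rw [Bool.not_eq_true] at hw
          simp [chunkStep, h, prefAt, hp, hw, isIn_singleton_eq_chunkPref, ih]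

-- … and the second component is the LAST index that is whitespace but not preferred
theorem foldl_chunkStep_snd (t : List Char) (l : List Int) (acc : Int × Int) :
    (l.foldl (chunkStep t) acc).2 =
      match l.reverse.find? (fun i => !prefAt t i && wsAt t i) with
      | some i => i
      | none => acc.2 := by
  induction l using List.reverseRecOn generalizing acc with
  | nil => rfl
  | append_singleton l a ih =>
    rw [List.foldl_append, List.reverse_append]
    simp only [List.foldl_cons, List.foldl_nil, List.reverse_singleton, List.singleton_append,
      List.find?]
    cases h : PySem.List.pyGet? t a with
    | none => simp [chunkStep, h, prefAt, wsAt, ih]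
    | some c =>
      by_cases hp : chunkPref c = true
      · simp [chunkStep, h, prefAt, wsAt, hp, isIn_singleton_eq_chunkPref, ih]
      · rw [Bool.not_eq_true] at hp
        by_cases hw : PySem.Chars.isspace c = true
        · simp [chunkStep, h, prefAt, wsAt, hp, hw, isIn_singleton_eq_chunkPref]
        · rw [Bool.not_eq_true] at hw
          simp [chunkStep, h, prefAt, wsAt, hp, hw, isIn_singleton_eq_chunkPref, ih]

theorem find?_congr_mem {α : Type} (l : List α) (p q : α → Bool)
    (h : ∀ x ∈ l, p x = q x) : l.find? p = l.find? q := by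
  induction l with
  | nil => rfl
  | cons a l ih =>
    simp only [List.find?, h a (List.mem_cons_self)]
    cases q a
    · exact ih fun x hx => h x (List.mem_cons_of_mem a hx)
    · rfl

-- ===== VERDICT (by name: the statement is the Claim_ definition above) =====
theorem find_chunk_end_py_spec : Claim_equal_find_chunk_end_py := by
  intro text start target_end _ hpre
  unfold Spec_find_chunk_end_py find_chunk_end_py find_chunk_end_py_alt
  by_cases hle : target_end ≤ start
  · simp [hle]
  · simp only [hle, if_false]
    have hlt : start < target_end := lt_of_not_ge hle
    rcases hpre with h | ⟨hs0, hlen⟩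
    · omega
    set ss := max start (target_end - 250) with hss
    have hss0 : 0 ≤ ss := le_trans hs0 (le_max_left _ _)
    -- the descending range is the reverse of the ascending one
    have hrev : PySem.List.pyRange (target_end - 1) (ss - 1) (-1)
        = (PySem.List.pyRange ss target_end 1).reverse := by
      rw [PySem.List.pyRange_neg_one_eq_reverse]
      norm_num
    -- any index found lies in the window, hence is ≥ 0, hence ≠ -1
    have hmem : ∀ p i, (PySem.List.pyRange ss target_end 1).reverse.find? p = some i → i ≠ -1 := by
      intro p i hf
      have := List.find?_some hf
      have hmem := List.mem_reverse.mp (List.mem_of_find?_eq_some hf)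
      have := (PySem.List.mem_pyRange_one).mp hmem
      omega
    rw [hrev, chunkScan_eq_find?, chunkScan_eq_find?,
      foldl_chunkStep_fst, foldl_chunkStep_snd]
    have hpa : (fun i => match PySem.List.pyGet? text.toList i with
                         | some c => chunkPref c
                         | none => false) = prefAt text.toList := rfl
    have hwa : (fun i => match PySem.List.pyGet? text.toList i with
                         | some c => PySem.Chars.isspace c
                         | none => false) = wsAt text.toList := rfl
    rw [hpa, hwa]
    cases hfp : (PySem.List.pyRange ss target_end 1).reverse.find? (prefAt text.toList) with
    | some i =>
      have := hmem _ _ hfp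
      simp [this]
    | none =>
      -- no preferred char in the window: the 'elif' test agrees with plain isspace
      have hnone : ∀ x ∈ (PySem.List.pyRange ss target_end 1).reverse, prefAt text.toList x = false := by
        intro x hx
        have := List.find?_eq_none.mp hfp x hx
        simpa using this
      have hcong : (PySem.List.pyRange ss target_end 1).reverse.find? (wsAt text.toList)
          = (PySem.List.pyRange ss target_end 1).reverse.find?
              (fun i => !prefAt text.toList i && wsAt text.toList i) := by
        apply find?_congr_mem
        intro x hx
        simp [hnone x hx]
      rw [hcong]
      cases hfw : (PySem.List.pyRange ss target_end 1).reverse.find?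
          (fun i => !prefAt text.toList i && wsAt text.toList i) with
      | some i =>
        have := hmem _ _ hfw
        simp [this]
      | none => simp
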